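-- pv_equiv track=rewrite | github.com/ShivaniiTS/LatestAIScribe | postprocessor/medasr_postprocessor.py | _has_internal_stutter
-- ===== SOURCE A (Python) =====
-- def _has_internal_stutter(word: str) -> bool:
--     w = word.lower()
--     if len(w) < 5:
--         return False
--     for i in range(len(w) - 3):
--         if w[i:i+2] == w[i+2:i+4] and w[i:i+2].isalpha():
--             return True
--     for i in range(len(w) - 5):
--         if w[i:i+3] == w[i+3:i+6] and w[i:i+3].isalpha():
--             return True
--     return False
-- ===== SOURCE B (Python) =====
-- def _has_internal_stutter(word: str) -> bool:
--     # Run-length scan: a p-char stutter exists iff w[j] == w[j+p] (alpha) holds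
--     # at p consecutive positions; count that run instead of comparing substrings.
--     w = word.lower()
--     if len(w) < 5:
--         return False
--     for p in (2, 3):
--         run = 0
--         for j in range(len(w) - p):
--             if w[j] == w[j + p] and w[j].isalpha():
--                 run += 1
--                 if run >= p:
--                     return True
--             else:
--                 run = 0
--     return False
-- ===== Notes on version B (the rewrite author's own statement) =====
-- stated objective: alternative
-- what changed: Replaced A's two substring-slice scans by a run-length counter over the single-character period-p match predicate w[j]==w[j+p] (alpha): a p-stutter exists iff that predicate holds at p consecutive positions, so B keeps one integer accumulator and never builds or compares substrings.
import Mathlib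
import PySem

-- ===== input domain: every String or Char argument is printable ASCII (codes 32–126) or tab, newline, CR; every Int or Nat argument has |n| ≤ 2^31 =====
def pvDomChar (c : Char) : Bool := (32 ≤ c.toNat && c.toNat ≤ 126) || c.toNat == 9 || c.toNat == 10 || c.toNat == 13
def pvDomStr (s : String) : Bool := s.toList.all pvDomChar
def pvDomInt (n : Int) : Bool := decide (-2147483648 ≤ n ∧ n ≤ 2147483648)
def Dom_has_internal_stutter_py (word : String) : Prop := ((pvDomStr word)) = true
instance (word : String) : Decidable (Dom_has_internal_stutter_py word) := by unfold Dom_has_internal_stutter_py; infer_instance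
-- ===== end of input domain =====

-- B replaces A's substring-slice scans by a run-length counter over the period-p character match w[j]==w[j+p] (alternative algorithm, same cost).

-- ===== PORT A =====
-- literal transliteration of A: lower, length guard, then two early-return index loops comparing slices
def has_internal_stutter_py (word : String) : Bool :=
  let w := PySem.Str.lower word
  if PySem.Str.len w < 5 then false
  else if (PySem.List.pyRange 0 (PySem.Str.len w - 3) 1).any (fun i =>
      (PySem.Str.slice w (some i) (some (i+2)) == PySem.Str.slice w (some (i+2)) (some (i+4)))
      && PySem.Str.strIsalpha (PySem.Str.slice w (some i) (some (i+2))))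
  then true
  else (PySem.List.pyRange 0 (PySem.Str.len w - 5) 1).any (fun i =>
      (PySem.Str.slice w (some i) (some (i+3)) == PySem.Str.slice w (some (i+3)) (some (i+6)))
      && PySem.Str.strIsalpha (PySem.Str.slice w (some i) (some (i+3))))

-- ===== PORT B =====
-- Source B's loop body condition 'w[j] == w[j + p] and w[j].isalpha()'
def pvMb (w : List Char) (p : Nat) (j : Nat) : Bool :=
  (w.getD j ' ' == w.getD (j + p) ' ') && PySem.Chars.isalpha (w.getD j ' ')

-- Source B's inner 'for j in range(len(w) - p)' loop with the 'run' accumulator and early return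
def pvRunGo (w : List Char) (p : Nat) : List Nat → Nat → Bool
  | [], _ => false
  | j :: rest, run =>
    if pvMb w p j then
      if p ≤ run + 1 then true else pvRunGo w p rest (run + 1)
    else pvRunGo w p rest 0

def has_internal_stutter_py_alt (word : String) : Bool :=
  let w := PySem.Str.lower word
  if PySem.Str.len w < 5 then false
  else if pvRunGo w.toList 2 (List.range (w.toList.length - 2)) 0 then true
  else pvRunGo w.toList 3 (List.range (w.toList.length - 3)) 0

-- ===== PRECONDITION & SPEC =====
def Spec_has_internal_stutter_py (word : String) (out : Bool) : Prop := out = has_internal_stutter_py_alt word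
instance (word : String) (out : Bool) : Decidable (Spec_has_internal_stutter_py word out) := by unfold Spec_has_internal_stutter_py; infer_instance

-- ===== CLAIM (what is proved, stated in full; the proofs are below) =====
def Claim_equal_has_internal_stutter_py : Prop := ∀ (word : String), Dom_has_internal_stutter_py word → Spec_has_internal_stutter_py word (has_internal_stutter_py word)

-- ===== LEMMAS AND PROOFS =====

-- window predicates on natural indices, with the in-bounds condition built in
def pvQ2 (l : List Char) (k : Nat) : Bool :=
  decide (k + 4 ≤ l.length)
    && (l.getD k ' ' == l.getD (k+2) ' ') && (l.getD (k+1) ' ' == l.getD (k+3) ' ')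
    && PySem.Chars.isalpha (l.getD k ' ') && PySem.Chars.isalpha (l.getD (k+1) ' ')

def pvQ3 (l : List Char) (k : Nat) : Bool :=
  decide (k + 6 ≤ l.length)
    && (l.getD k ' ' == l.getD (k+3) ' ') && (l.getD (k+1) ' ' == l.getD (k+4) ' ')
    && (l.getD (k+2) ' ' == l.getD (k+5) ' ')
    && PySem.Chars.isalpha (l.getD k ' ') && PySem.Chars.isalpha (l.getD (k+1) ' ')
    && PySem.Chars.isalpha (l.getD (k+2) ' ')

theorem take2_drop (l : List Char) (k : Nat) (h : k + 2 ≤ l.length) :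
    (l.drop k).take 2 = [l.getD k ' ', l.getD (k+1) ' '] := by
  have h1 : l.drop k = l[k] :: l.drop (k+1) := (List.getElem_cons_drop (by omega)).symm
  have h2 : l.drop (k+1) = l[k+1] :: l.drop (k+2) := (List.getElem_cons_drop (by omega)).symm
  rw [h1, h2, List.getD_eq_getElem l ' ' (by omega : k < l.length),
      List.getD_eq_getElem l ' ' (by omega : k + 1 < l.length)]
  rfl

theorem take3_drop (l : List Char) (k : Nat) (h : k + 3 ≤ l.length) :
    (l.drop k).take 3 = [l.getD k ' ', l.getD (k+1) ' ', l.getD (k+2) ' '] := by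
  have h1 : l.drop k = l[k] :: l.drop (k+1) := (List.getElem_cons_drop (by omega)).symm
  have h2 : l.drop (k+1) = l[k+1] :: l.drop (k+2) := (List.getElem_cons_drop (by omega)).symm
  have h3 : l.drop (k+2) = l[k+2] :: l.drop (k+3) := (List.getElem_cons_drop (by omega)).symm
  rw [h1, h2, h3, List.getD_eq_getElem l ' ' (by omega : k < l.length),
      List.getD_eq_getElem l ' ' (by omega : k + 1 < l.length),
      List.getD_eq_getElem l ' ' (by omega : k + 2 < l.length)]
  rfl

theorem pred2_pt (l : List Char) (k : Nat) (h : k + 4 ≤ l.length) :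
    ((PySem.Chars.slice l (some (k:Int)) (some ((k:Int)+2)) == PySem.Chars.slice l (some ((k:Int)+2)) (some ((k:Int)+4)))
      && PySem.Chars.strIsalpha (PySem.Chars.slice l (some (k:Int)) (some ((k:Int)+2)))) = pvQ2 l k := by
  have e1 : (k:Int)+2 = ((k+2:Nat):Int) := by push_cast; ring
  have e2 : (k:Int)+4 = ((k+4:Nat):Int) := by push_cast; ring
  simp only [PySem.Chars.slice, e1, e2, PySem.List.slice_natCast]
  have r1 : k + 2 - k = 2 := by omega
  have r2 : k + 4 - (k + 2) = 2 := by omega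
  rw [r1, r2, take2_drop l k (by omega), take2_drop l (k+2) (by omega)]
  simp [pvQ2, PySem.Chars.strIsalpha, h, Bool.and_assoc]

theorem pred3_pt (l : List Char) (k : Nat) (h : k + 6 ≤ l.length) :
    ((PySem.Chars.slice l (some (k:Int)) (some ((k:Int)+3)) == PySem.Chars.slice l (some ((k:Int)+3)) (some ((k:Int)+6)))
      && PySem.Chars.strIsalpha (PySem.Chars.slice l (some (k:Int)) (some ((k:Int)+3)))) = pvQ3 l k := by
  have e1 : (k:Int)+3 = ((k+3:Nat):Int) := by push_cast; ring
  have e2 : (k:Int)+6 = ((k+6:Nat):Int) := by push_cast; ring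
  simp only [PySem.Chars.slice, e1, e2, PySem.List.slice_natCast]
  have r1 : k + 3 - k = 3 := by omega
  have r2 : k + 6 - (k + 3) = 3 := by omega
  rw [r1, r2, take3_drop l k (by omega), take3_drop l (k+3) (by omega)]
  simp [pvQ3, PySem.Chars.strIsalpha, h, Bool.and_assoc]

theorem pvA2_eq_any (l : List Char) :
    ((PySem.List.pyRange 0 ((l.length : Int) - 3) 1).any (fun i =>
      (PySem.Chars.slice l (some i) (some (i+2)) == PySem.Chars.slice l (some (i+2)) (some (i+4)))
      && PySem.Chars.strIsalpha (PySem.Chars.slice l (some i) (some (i+2)))))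
    = (List.range l.length).any (pvQ2 l) := by
  rw [PySem.List.pyRange_one, List.any_map, Bool.eq_iff_iff]
  simp only [List.any_eq_true, List.mem_range, Function.comp, zero_add]
  constructor
  · rintro ⟨k, hk, hp⟩
    have hk' : k + 4 ≤ l.length := by omega
    refine ⟨k, by omega, ?_⟩
    rw [← pred2_pt l k hk']
    simpa using hp
  · rintro ⟨k, hk, hq⟩
    have hb : k + 4 ≤ l.length := by
      by_contra hc
      simp [pvQ2, hc] at hq
    refine ⟨k, by omega, ?_⟩
    rw [pred2_pt l k hb]
    exact hq

theorem pvA3_eq_any (l : List Char) :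
    ((PySem.List.pyRange 0 ((l.length : Int) - 5) 1).any (fun i =>
      (PySem.Chars.slice l (some i) (some (i+3)) == PySem.Chars.slice l (some (i+3)) (some (i+6)))
      && PySem.Chars.strIsalpha (PySem.Chars.slice l (some i) (some (i+3)))))
    = (List.range l.length).any (pvQ3 l) := by
  rw [PySem.List.pyRange_one, List.any_map, Bool.eq_iff_iff]
  simp only [List.any_eq_true, List.mem_range, Function.comp, zero_add]
  constructor
  · rintro ⟨k, hk, hp⟩
    have hk' : k + 6 ≤ l.length := by omega
    refine ⟨k, by omega, ?_⟩
    rw [← pred3_pt l k hk']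
    simpa using hp
  · rintro ⟨k, hk, hq⟩
    have hb : k + 6 ≤ l.length := by
      by_contra hc
      simp [pvQ3, hc] at hq
    refine ⟨k, by omega, ?_⟩
    rw [pred3_pt l k hb]
    exact hq

-- invariant of B's run counter: with r previous consecutive matches just before s,
-- the loop over [s, s+m) returns true iff some full p-window of matches fits in [s-r, s+m)
theorem runGo_spec (w : List Char) (p : Nat) :
    ∀ (m s r : Nat), r < p → r ≤ s →
    (∀ k, s - r ≤ k → k < s → pvMb w p k = true) →
    (pvRunGo w p (List.range' s m) r = true ↔
      ∃ i, s - r ≤ i ∧ i + p ≤ s + m ∧ ∀ k, k < p → pvMb w p (i + k) = true) := by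
  intro m
  induction m with
  | zero =>
    intro s r hrp hrs _
    simp only [List.range', pvRunGo]
    constructor
    · intro h; cases h
    · rintro ⟨i, h1, h2, _⟩; omega
  | succ m ih =>
    intro s r hrp hrs hpre
    rw [List.range'_succ]
    by_cases hM : pvMb w p s = true
    · by_cases hfull : p ≤ r + 1
      · have hpr : p = r + 1 := by omega
        simp only [pvRunGo, hM, hfull, if_pos]
        constructor
        · intro _
          refine ⟨s - r, le_refl _, by omega, ?_⟩
          intro k hk
          by_cases hkr : k < r
          · exact hpre (s - r + k) (by omega) (by omega)
          · have : s - r + k = s := by omega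
            rw [this]; exact hM
        · intro _; trivial
      · have step : pvRunGo w p (s :: List.range' (s+1) m) r
            = pvRunGo w p (List.range' (s+1) m) (r+1) := by
          simp [pvRunGo, hM, hfull]
        rw [step, ih (s+1) (r+1) (by omega) (by omega) ?_]
        · constructor
          · rintro ⟨i, h1, h2, h3⟩
            exact ⟨i, by omega, by omega, h3⟩
          · rintro ⟨i, h1, h2, h3⟩
            exact ⟨i, by omega, by omega, h3⟩
        · intro k hk1 hk2
          by_cases hks : k < s
          · exact hpre k (by omega) hks
          · have : k = s := by omega
            rw [this]; exact hM
    · have step : pvRunGo w p (s :: List.range' (s+1) m) r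
          = pvRunGo w p (List.range' (s+1) m) 0 := by
        simp [pvRunGo, hM]
      rw [step, ih (s+1) 0 (by omega) (by omega) (by intro k h1 h2; omega)]
      constructor
      · rintro ⟨i, h1, h2, h3⟩
        exact ⟨i, by omega, by omega, h3⟩
      · rintro ⟨i, h1, h2, h3⟩
        refine ⟨i, ?_, by omega, h3⟩
        by_contra hlt
        have his : i ≤ s := by omega
        have hsm : s - i < p := by omega
        have := h3 (s - i) hsm
        rw [show i + (s - i) = s from by omega] at this
        exact hM this

theorem run2_eq (l : List Char) :
    pvRunGo l 2 (List.range (l.length - 2)) 0 = (List.range l.length).any (pvQ2 l) := by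
  rw [List.range_eq_range', Bool.eq_iff_iff,
      runGo_spec l 2 (l.length - 2) 0 0 (by omega) (by omega) (by intro k h1 h2; omega)]
  simp only [List.any_eq_true, List.mem_range]
  constructor
  · rintro ⟨i, _, h2, h3⟩
    have m0 := h3 0 (by omega)
    have m1 := h3 1 (by omega)
    simp only [pvMb, Nat.add_zero, Bool.and_eq_true, beq_iff_eq] at m0 m1
    rw [show i + 1 + 2 = i + 3 from by omega] at m1
    refine ⟨i, by omega, ?_⟩
    simp only [pvQ2, Bool.and_eq_true, decide_eq_true_eq, beq_iff_eq]
    exact ⟨⟨⟨⟨by omega, m0.1⟩, m1.1⟩, m0.2⟩, m1.2⟩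
  · rintro ⟨i, _, hq⟩
    simp only [pvQ2, Bool.and_eq_true, decide_eq_true_eq, beq_iff_eq] at hq
    obtain ⟨⟨⟨⟨hb, e1⟩, e2⟩, a1⟩, a2⟩ := hq
    refine ⟨i, by omega, by omega, ?_⟩
    intro k hk
    interval_cases k
    · simp only [pvMb, Nat.add_zero, Bool.and_eq_true, beq_iff_eq]
      exact ⟨e1, a1⟩
    · simp only [pvMb, Bool.and_eq_true, beq_iff_eq]
      rw [show i + 1 + 2 = i + 3 from by omega]
      exact ⟨e2, a2⟩

theorem run3_eq (l : List Char) :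
    pvRunGo l 3 (List.range (l.length - 3)) 0 = (List.range l.length).any (pvQ3 l) := by
  rw [List.range_eq_range', Bool.eq_iff_iff,
      runGo_spec l 3 (l.length - 3) 0 0 (by omega) (by omega) (by intro k h1 h2; omega)]
  simp only [List.any_eq_true, List.mem_range]
  constructor
  · rintro ⟨i, _, h2, h3⟩
    have m0 := h3 0 (by omega)
    have m1 := h3 1 (by omega)
    have m2 := h3 2 (by omega)
    simp only [pvMb, Nat.add_zero, Bool.and_eq_true, beq_iff_eq] at m0 m1 m2
    rw [show i + 1 + 3 = i + 4 from by omega] at m1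
    rw [show i + 2 + 3 = i + 5 from by omega] at m2
    refine ⟨i, by omega, ?_⟩
    simp only [pvQ3, Bool.and_eq_true, decide_eq_true_eq, beq_iff_eq]
    exact ⟨⟨⟨⟨⟨⟨by omega, m0.1⟩, m1.1⟩, m2.1⟩, m0.2⟩, m1.2⟩, m2.2⟩
  · rintro ⟨i, _, hq⟩
    simp only [pvQ3, Bool.and_eq_true, decide_eq_true_eq, beq_iff_eq] at hq
    obtain ⟨⟨⟨⟨⟨⟨hb, e1⟩, e2⟩, e3⟩, a1⟩, a2⟩, a3⟩ := hq
    refine ⟨i, by omega, by omega, ?_⟩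
    intro k hk
    interval_cases k
    · simp only [pvMb, Nat.add_zero, Bool.and_eq_true, beq_iff_eq]
      exact ⟨e1, a1⟩
    · simp only [pvMb, Bool.and_eq_true, beq_iff_eq]
      rw [show i + 1 + 3 = i + 4 from by omega]
      exact ⟨e2, a2⟩
    · simp only [pvMb, Bool.and_eq_true, beq_iff_eq]
      rw [show i + 2 + 3 = i + 5 from by omega]
      exact ⟨e3, a3⟩

-- String-level BEq agrees with list-level BEq
theorem str_beq_toList (s t : String) : (s == t) = (s.toList == t.toList) := by
  rw [Bool.eq_iff_iff, beq_iff_eq, beq_iff_eq]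
  exact ⟨fun h => by rw [h], fun h => String.toList_inj.mp h⟩

-- ===== VERDICT (by name: the statement is the Claim_ definition above) =====
theorem has_internal_stutter_py_spec : Claim_equal_has_internal_stutter_py := by
  intro word _
  unfold Spec_has_internal_stutter_py has_internal_stutter_py has_internal_stutter_py_alt
  set w := PySem.Str.lower word with hw
  simp only [PySem.Str.len_eq]
  by_cases h5 : (w.toList.length : Int) < 5
  · rw [if_pos h5, if_pos h5]
  · rw [if_neg h5, if_neg h5]
    have hA2 : ∀ i : Int,
        ((PySem.Str.slice w (some i) (some (i+2)) == PySem.Str.slice w (some (i+2)) (some (i+4)))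
          && PySem.Str.strIsalpha (PySem.Str.slice w (some i) (some (i+2))))
        = ((PySem.Chars.slice w.toList (some i) (some (i+2)) == PySem.Chars.slice w.toList (some (i+2)) (some (i+4)))
          && PySem.Chars.strIsalpha (PySem.Chars.slice w.toList (some i) (some (i+2)))) := by
      intro i
      rw [str_beq_toList, PySem.Str.toList_slice, PySem.Str.toList_slice,
          PySem.Str.strIsalpha_eq, PySem.Str.toList_slice]
    have hA3 : ∀ i : Int,
        ((PySem.Str.slice w (some i) (some (i+3)) == PySem.Str.slice w (some (i+3)) (some (i+6)))
          && PySem.Str.strIsalpha (PySem.Str.slice w (some i) (some (i+3))))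
        = ((PySem.Chars.slice w.toList (some i) (some (i+3)) == PySem.Chars.slice w.toList (some (i+3)) (some (i+6)))
          && PySem.Chars.strIsalpha (PySem.Chars.slice w.toList (some i) (some (i+3)))) := by
      intro i
      rw [str_beq_toList, PySem.Str.toList_slice, PySem.Str.toList_slice,
          PySem.Str.strIsalpha_eq, PySem.Str.toList_slice]
    rw [PySem.List.any_congr_mem (fun i _ => hA2 i), PySem.List.any_congr_mem (fun i _ => hA3 i),
        pvA2_eq_any w.toList, pvA3_eq_any w.toList, ← run2_eq, ← run3_eq]
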